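-- pv_equiv track=rewrite | github.com/neodymeiro/computational-linguistics-project | example3_heaps_law.py | growth_curve
-- ===== SOURCE A (Python) =====
-- def growth_curve(tokens, step=1000):
--     results = []
--     seen = set()
--     N = 0
--     for i, w in enumerate(tokens, start=1):
--         N += 1
--         seen.add(w)
--         if i % step == 0:
--             V = len(seen)
--             results.append((N, V))
--     return results
-- ===== SOURCE B (Python) =====
-- def growth_curve(tokens, step=1000):
--     # Chunked: consume tokens in blocks of |step|; each full block yields one point.
--     s = abs(step)
--     results = []
--     seen = set()
--     for end in range(s, len(tokens) + 1, s):
--         seen.update(tokens[end - s:end])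
--         results.append((end, len(seen)))
--     return results
-- ===== Notes on version B (the rewrite author's own statement) =====
-- stated objective: faster
-- what changed: Instead of enumerating tokens one by one and testing i % step == 0 at every token, B iterates only over the block end positions range(|step|, len(tokens)+1, |step|), bulk-adds each block to the seen set with set.update over a slice, and appends one point per full block; intended as faster by a constant factor (measured ~1.8x at the largest probe size).
-- outside the precondition, e.g. on growth_curve([], 0): A returns [], B raises ValueError
import Mathlib
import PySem

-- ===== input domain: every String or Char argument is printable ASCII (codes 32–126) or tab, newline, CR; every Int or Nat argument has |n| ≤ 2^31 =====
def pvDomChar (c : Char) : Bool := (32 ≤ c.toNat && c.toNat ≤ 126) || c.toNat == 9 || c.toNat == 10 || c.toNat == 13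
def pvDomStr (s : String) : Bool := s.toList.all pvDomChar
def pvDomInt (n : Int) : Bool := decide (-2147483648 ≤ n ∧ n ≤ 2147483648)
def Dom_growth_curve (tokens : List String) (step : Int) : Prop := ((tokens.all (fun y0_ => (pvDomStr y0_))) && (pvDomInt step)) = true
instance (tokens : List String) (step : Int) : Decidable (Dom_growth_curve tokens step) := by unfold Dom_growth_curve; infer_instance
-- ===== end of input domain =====

-- B re-implements A by processing tokens in blocks of |step| (one set.update + one point per full
-- block) instead of a per-token modulo test (alternative decomposition; return value only).

-- ===== PORT A =====
-- loop body of A's 'for i, w in enumerate(tokens, start=1)': state = (results, seen, N)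
def gA (step : Int) (st : List (Int × Int) × PySem.Set String × Int) (iw : Int × String) :
    List (Int × Int) × PySem.Set String × Int :=
  let N := st.2.2 + 1
  let seen := PySem.Set.add st.2.1 iw.2
  if PySem.Int.mod iw.1 step = 0 then
    (st.1 ++ [(N, PySem.Set.len seen)], seen, N)
  else
    (st.1, seen, N)

def growth_curve (tokens : List String) (step : Int) : List (Int × Int) :=
  ((PySem.List.enumerate tokens 1).foldl (gA step) ([], PySem.Set.empty, 0)).1

-- ===== PORT B =====
-- loop body of B's 'for end in range(s, len(tokens)+1, s)': state = (results, seen)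
def gB (tokens : List String) (s : Int) (st : List (Int × Int) × PySem.Set String) (e : Int) :
    List (Int × Int) × PySem.Set String :=
  let seen := PySem.Set.update st.2 (PySem.List.slice tokens (some (e - s)) (some e))
  (st.1 ++ [(e, PySem.Set.len seen)], seen)

def growth_curve_alt (tokens : List String) (step : Int) : List (Int × Int) :=
  let s : Int := |step|
  ((PySem.List.pyRange s (PySem.List.len tokens + 1) s).foldl (gB tokens s) ([], PySem.Set.empty)).1

-- ===== PRECONDITION & SPEC =====
-- Pre_ excludes step = 0: there A raises ZeroDivisionError whenever tokens is nonempty, and in the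
-- one remaining step = 0 case A returns an empty result only because the loop body never runs, while B's
-- range-based chunker raises ValueError for step 0 regardless.
def Pre_growth_curve (tokens : List String) (step : Int) : Prop := step ≠ 0
instance (tokens : List String) (step : Int) : Decidable (Pre_growth_curve tokens step) := by
  unfold Pre_growth_curve; infer_instance
def pvWitness_growth_curve : List String × Int := (["a", "b", "a"], 2)
def Spec_growth_curve (tokens : List String) (step : Int) (out : List (Int × Int)) : Prop := out = growth_curve_alt tokens step
instance (tokens : List String) (step : Int) (out : List (Int × Int)) : Decidable (Spec_growth_curve tokens step out) := by unfold Spec_growth_curve; infer_instance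

-- ===== CLAIM (what is proved, stated in full; the proofs are below) =====
def Claim_equal_growth_curve : Prop := ∀ (tokens : List String) (step : Int), Dom_growth_curve tokens step → Pre_growth_curve tokens step → Spec_growth_curve tokens step (growth_curve tokens step)

-- ===== LEMMAS AND PROOFS =====

-- the point recorded after m tokens have been consumed
def pointAt (tokens : List String) (m : Nat) : Int × Int :=
  ((m : Int), PySem.Set.len (PySem.Set.ofList (tokens.take m)))

-- A's fold, in closed form: one point for each position 1..n whose index % step == 0
def closedA (tokens : List String) (step : Int) : List (Int × Int) :=
  ((PySem.List.pyRange 1 ((tokens.length : Int) + 1) 1).filter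
      (fun i => decide (PySem.Int.mod i step = 0))).map
    (fun i => pointAt tokens i.toNat)

lemma A_inv (step : Int) (xs : List String) :
    (PySem.List.enumerate xs 1).foldl (gA step) ([], PySem.Set.empty, 0)
      = (closedA xs step, PySem.Set.ofList xs, (xs.length : Int)) := by
  induction xs using List.reverseRecOn with
  | nil =>
    simp [closedA, PySem.List.enumerate_nil, PySem.List.pyRange_one_eq_nil (le_refl (1 : Int))]
  | append_singleton xs x ih =>
    rw [PySem.List.enumerate_append, List.foldl_append, ih]
    have hone : PySem.List.enumerate [x] (1 + (xs.length : Int)) = [((1 + (xs.length : Int)), x)] := by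
      simp [PySem.List.enumerate_cons, PySem.List.enumerate_nil]
    rw [hone]
    simp only [List.foldl_cons, List.foldl_nil]
    unfold gA
    have hseen : PySem.Set.add (PySem.Set.ofList xs) x = PySem.Set.ofList (xs ++ [x]) :=
      (PySem.Set.ofList_append_singleton xs x).symm
    have hlen : (((xs ++ [x]).length : Nat) : Int) = (xs.length : Int) + 1 := by simp
    have hmap : ∀ i ∈ (PySem.List.pyRange 1 ((xs.length : Int) + 1) 1).filter
        (fun i => decide (PySem.Int.mod i step = 0)),
        pointAt (xs ++ [x]) i.toNat = pointAt xs i.toNat := by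
      intro i hi
      have hi' := (List.mem_filter.mp hi).1
      have hb := PySem.List.mem_pyRange_one.mp hi'
      unfold pointAt
      rw [List.take_append_of_le_length (by omega : i.toNat ≤ xs.length)]
    unfold closedA
    rw [hlen, PySem.List.pyRange_one_succ_right (by omega : (1 : Int) ≤ (xs.length : Int) + 1),
      List.filter_append, List.map_append, List.map_congr_left hmap]
    have hc : (1 + (xs.length : Int)) = (xs.length : Int) + 1 := by omega
    rw [hc]
    by_cases hdvd : PySem.Int.mod ((xs.length : Int) + 1) step = 0
    · have hfilt : List.filter (fun i => decide (PySem.Int.mod i step = 0))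
          [(xs.length : Int) + 1] = [(xs.length : Int) + 1] := by
        simp [hdvd]
      rw [if_pos hdvd, hfilt, hseen]
      have hpt : pointAt (xs ++ [x]) ((xs.length : Int) + 1).toNat
          = ((xs.length : Int) + 1, PySem.Set.len (PySem.Set.ofList (xs ++ [x]))) := by
        unfold pointAt
        have h1 : ((xs.length : Int) + 1).toNat = xs.length + 1 := by omega
        rw [h1]
        have h2 : List.take (xs.length + 1) (xs ++ [x]) = xs ++ [x] := by
          apply List.take_of_length_le; simp
        rw [h2]
        simp
      rw [List.map_singleton, hpt]
    · have hfilt : List.filter (fun i => decide (PySem.Int.mod i step = 0))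
          [(xs.length : Int) + 1] = [] := by
        simp [hdvd]
      rw [if_neg hdvd, hfilt, hseen]
      simp

-- the list of full-block end positions, as Nats times the block size
lemma filt_eq (step : Int) (n : Nat) :
    (PySem.List.pyRange 1 ((n : Int) + 1) 1).filter (fun i => decide (PySem.Int.mod i step = 0))
      = (List.range' 1 (n / step.natAbs)).map (fun k => ((k * step.natAbs : Nat) : Int)) := by
  induction n with
  | zero => simp [PySem.List.pyRange_one_eq_nil (le_refl (1 : Int))]
  | succ n ih =>
    have hcast : (((n + 1 : Nat)) : Int) + 1 = ((n : Int) + 1) + 1 := by push_cast; ring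
    rw [hcast, PySem.List.pyRange_one_succ_right (by omega : (1 : Int) ≤ (n : Int) + 1),
      List.filter_append, ih]
    have hdvds : (PySem.Int.mod ((n : Int) + 1) step = 0) ↔ step.natAbs ∣ (n + 1) := by
      rw [PySem.Int.mod_eq_zero_iff_dvd]
      have h1 : ((n : Int) + 1) = ((n + 1 : Nat) : Int) := by push_cast; ring
      rw [h1, ← Int.natAbs_dvd, Int.natCast_dvd_natCast]
    rw [Nat.succ_div]
    by_cases hd : step.natAbs ∣ (n + 1)
    · have hfilt : List.filter (fun i => decide (PySem.Int.mod i step = 0)) [(n : Int) + 1]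
          = [(n : Int) + 1] := by simp [hdvds.mpr hd]
      rw [hfilt, if_pos hd, List.range'_concat, List.map_append]
      congr 1
      have hmul : (1 + 1 * (n / step.natAbs)) * step.natAbs = n + 1 := by
        have h3 : (n + 1) / step.natAbs = n / step.natAbs + 1 := by
          rw [Nat.succ_div, if_pos hd]
        calc (1 + 1 * (n / step.natAbs)) * step.natAbs
            = (n + 1) / step.natAbs * step.natAbs := by rw [h3]; ring
          _ = n + 1 := Nat.div_mul_cancel hd
      simp only [List.map_singleton, hmul]
      norm_cast
    · have hfilt : List.filter (fun i => decide (PySem.Int.mod i step = 0)) [(n : Int) + 1]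
          = [] := by simp [hd, hdvds]
      rw [hfilt, if_neg hd]
      simp

lemma pyRange_chunks (s : Nat) (hs : 0 < s) (n : Nat) :
    PySem.List.pyRange (s : Int) ((n : Int) + 1) (s : Int)
      = (List.range' 1 (n / s)).map (fun k => ((k * s : Nat) : Int)) := by
  rw [PySem.List.pyRange_of_pos _ _ (by exact_mod_cast hs)]
  have hcnt : (if (s : Int) < (n : Int) + 1 then
      (((n : Int) + 1 - (s : Int) + (s : Int) - 1) / (s : Int)).toNat else 0) = n / s := by
    by_cases h : (s : Int) < (n : Int) + 1
    · rw [if_pos h]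
      have h1 : ((n : Int) + 1 - (s : Int) + (s : Int) - 1) = ((n : Nat) : Int) := by ring
      rw [h1]
      have h2 : ((n : Nat) : Int) / ((s : Nat) : Int) = ((n / s : Nat) : Int) :=
        (Int.natCast_div n s).symm
      rw [h2, Int.toNat_natCast]
    · rw [if_neg h]
      have : n < s := by omega
      exact (Nat.div_eq_of_lt this).symm
  rw [hcnt, List.range'_eq_map_range, List.map_map]
  apply List.map_congr_left
  intro k _
  simp only [Function.comp_apply]
  push_cast
  ring

lemma B_inv (tokens : List String) (s : Nat) (hs : 0 < s) (q : Nat) (hq : q * s ≤ tokens.length) :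
    ((List.range' 1 q).map (fun k => ((k * s : Nat) : Int))).foldl (gB tokens (s : Int))
        ([], PySem.Set.empty)
      = ((List.range' 1 q).map (fun k => pointAt tokens (k * s)),
         PySem.Set.ofList (tokens.take (q * s))) := by
  induction q with
  | zero => simp [PySem.Set.ofList]
  | succ q ih =>
    have hq' : q * s ≤ tokens.length :=
      le_trans (Nat.mul_le_mul_right _ (by omega)) hq
    rw [List.range'_concat, List.map_append, List.foldl_append, ih hq']
    simp only [List.map_cons, List.map_nil, List.foldl_cons, List.foldl_nil]
    unfold gB
    have hsub : (((1 + 1 * q) * s : Nat) : Int) - (s : Nat) = ((q * s : Nat) : Int) := by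
      push_cast; ring
    rw [hsub, PySem.List.slice_natCast]
    have hdiff : (1 + 1 * q) * s - q * s = s := by
      have : (1 + 1 * q) * s = s + q * s := by ring
      omega
    rw [hdiff]
    have hupd : PySem.Set.update (PySem.Set.ofList (tokens.take (q * s)))
        (List.take s (tokens.drop (q * s))) = PySem.Set.ofList (tokens.take ((q + 1) * s)) := by
      rw [← PySem.Set.ofList_append, ← List.take_add]
      have hqs : q * s + s = (q + 1) * s := by ring
      rw [hqs]
    rw [hupd]
    have h1 : (1 + 1 * q) * s = (q + 1) * s := by ring
    simp only [List.map_append, List.map_singleton, h1]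
    unfold pointAt
    rfl

-- ===== VERDICT (by name: the statement is the Claim_ definition above) =====
theorem growth_curve_spec : Claim_equal_growth_curve := by
  intro tokens step _ hpre
  unfold Spec_growth_curve growth_curve growth_curve_alt
  have hs : 0 < step.natAbs := Int.natAbs_pos.mpr hpre
  have habs : |step| = (step.natAbs : Int) := Int.abs_eq_natAbs step
  rw [A_inv]
  show closedA tokens step
      = ((PySem.List.pyRange |step| (PySem.List.len tokens + 1) |step|).foldl
          (gB tokens |step|) ([], PySem.Set.empty)).1
  rw [habs, PySem.List.len_eq, pyRange_chunks step.natAbs hs tokens.length,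
    B_inv tokens step.natAbs hs (tokens.length / step.natAbs) (Nat.div_mul_le_self _ _)]
  unfold closedA
  rw [filt_eq step tokens.length, List.map_map]
  apply List.map_congr_left
  intro k _
  show pointAt tokens ((k * step.natAbs : Nat) : Int).toNat = pointAt tokens (k * step.natAbs)
  rw [Int.toNat_natCast]
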